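-- pv_equiv track=rewrite | github.com/SahandSM/PCP | agents/agent_minimax/heuristic.py | evaluate_one_direction
-- ===== SOURCE A (Python) =====
-- def evaluate_one_direction(windows,player):
--     # I need to evlaute each direction separately to catch if for example therer is both horizontal and diagonal score 3.
--     score = []
--     for window in windows:
--         player_new_score = evaluate_window_for_player(window,player)
--         score = score + player_new_score
--         if player_new_score: break
--
--     for window in windows:
--         opponent_new_score = evaluate_window_for_opponent(window,player)
--         score = score + opponent_new_score
--         if opponent_new_score: break
--     return score
--
-- def evaluate_window_for_player(window,player):
--     score = []
--     n_pieces = window.count(player)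
--     n_zeros = window.count(0)
--
--     if n_pieces == 3: score.append(3)
--     elif n_pieces == 2 and n_zeros == 2: score.append(2)
--     return score
--
-- def evaluate_window_for_opponent(window,player):
--     score = []
--     n_pieces = window.count(player)
--     n_zeros = window.count(0)
--
--     if n_pieces == 0 and n_zeros == 1: score.append(-3)
--     elif n_pieces == 0 and n_zeros == 2: score.append(-2)
--     return score
-- ===== SOURCE B (Python) =====
-- def evaluate_one_direction(windows, player):
--     player_score = None
--     opponent_score = None
--     for window in windows:
--         n_pieces = window.count(player)
--         n_zeros = window.count(0)
--         if player_score is None: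
--             if n_pieces == 3:
--                 player_score = 3
--             elif n_pieces == 2 and n_zeros == 2:
--                 player_score = 2
--         if opponent_score is None:
--             if n_pieces == 0 and n_zeros == 1:
--                 opponent_score = -3
--             elif n_pieces == 0 and n_zeros == 2:
--                 opponent_score = -2
--         if player_score is not None and opponent_score is not None:
--             break
--     result = []
--     if player_score is not None:
--         result.append(player_score)
--     if opponent_score is not None:
--         result.append(opponent_score)
--     return result
-- ===== Notes on version B (the rewrite author's own statement) =====
-- stated objective: alternative
-- what changed: Replaces A's two separate scans over windows (one for the player score, one for the opponent score) with a single pass that maintains two Optional accumulators and stops once both are set, then emits player-before-opponent.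
import Mathlib
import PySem

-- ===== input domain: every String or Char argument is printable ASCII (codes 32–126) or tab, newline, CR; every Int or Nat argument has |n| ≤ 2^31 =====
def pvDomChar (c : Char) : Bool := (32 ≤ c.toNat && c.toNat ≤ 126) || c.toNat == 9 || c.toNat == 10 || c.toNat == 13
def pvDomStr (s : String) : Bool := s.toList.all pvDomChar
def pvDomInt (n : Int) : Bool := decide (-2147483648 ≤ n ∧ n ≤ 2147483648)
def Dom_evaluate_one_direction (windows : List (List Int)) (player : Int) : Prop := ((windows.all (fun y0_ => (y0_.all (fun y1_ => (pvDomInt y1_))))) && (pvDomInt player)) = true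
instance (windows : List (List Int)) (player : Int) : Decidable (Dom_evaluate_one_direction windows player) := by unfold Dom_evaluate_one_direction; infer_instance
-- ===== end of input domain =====

-- ===== PORT A =====
-- B changes the decomposition: one pass with two Option accumulators instead of A's two scans; same cost, no speed claim.
def evaluate_window_for_player (window : List Int) (player : Int) : List Int :=
  let n_pieces := PySem.List.count window player
  let n_zeros := PySem.List.count window 0
  if n_pieces = 3 then [3]
  else if n_pieces = 2 ∧ n_zeros = 2 then [2]
  else []

def evaluate_window_for_opponent (window : List Int) (player : Int) : List Int :=
  let n_pieces := PySem.List.count window player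
  let n_zeros := PySem.List.count window 0
  if n_pieces = 0 ∧ n_zeros = 1 then [-3]
  else if n_pieces = 0 ∧ n_zeros = 2 then [-2]
  else []

-- A's first loop: accumulate, break on first nonempty window score
def loopPlayer (windows : List (List Int)) (player : Int) (score : List Int) : List Int :=
  match windows with
  | [] => score
  | w :: ws =>
    let player_new_score := evaluate_window_for_player w player
    let score := score ++ player_new_score
    if player_new_score ≠ [] then score else loopPlayer ws player score

-- A's second loop, same shape
def loopOpponent (windows : List (List Int)) (player : Int) (score : List Int) : List Int :=
  match windows with
  | [] => score
  | w :: ws =>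
    let opponent_new_score := evaluate_window_for_opponent w player
    let score := score ++ opponent_new_score
    if opponent_new_score ≠ [] then score else loopOpponent ws player score

def evaluate_one_direction (windows : List (List Int)) (player : Int) : List Int :=
  loopOpponent windows player (loopPlayer windows player [])

-- ===== PORT B =====
def optList (o : Option Int) : List Int :=
  match o with
  | some v => [v]
  | none => []

-- B's single loop: update the unset accumulators from this window, break when both set
def loopB (windows : List (List Int)) (player : Int) (p o : Option Int) : List Int :=
  match windows with
  | [] => optList p ++ optList o
  | w :: ws =>
    let n_pieces := PySem.List.count w player
    let n_zeros := PySem.List.count w 0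
    let p := if p.isNone then
        (if n_pieces = 3 then some 3
         else if n_pieces = 2 ∧ n_zeros = 2 then some 2
         else none)
      else p
    let o := if o.isNone then
        (if n_pieces = 0 ∧ n_zeros = 1 then some (-3)
         else if n_pieces = 0 ∧ n_zeros = 2 then some (-2)
         else none)
      else o
    if p.isSome ∧ o.isSome then optList p ++ optList o
    else loopB ws player p o

def evaluate_one_direction_alt (windows : List (List Int)) (player : Int) : List Int :=
  loopB windows player none none

-- ===== PRECONDITION & SPEC =====
def Spec_evaluate_one_direction (windows : List (List Int)) (player : Int) (out : List Int) : Prop := out = evaluate_one_direction_alt windows player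
instance (windows : List (List Int)) (player : Int) (out : List Int) : Decidable (Spec_evaluate_one_direction windows player out) := by unfold Spec_evaluate_one_direction; infer_instance

-- ===== CLAIM (what is proved, stated in full; the proofs are below) =====
def Claim_equal_evaluate_one_direction : Prop := ∀ (windows : List (List Int)) (player : Int), Dom_evaluate_one_direction windows player → Spec_evaluate_one_direction windows player (evaluate_one_direction windows player)

-- ===== LEMMAS AND PROOFS =====
-- first player-score / opponent-score in the window list, as an Option
def firstP (windows : List (List Int)) (player : Int) : Option Int :=
  match windows with
  | [] => none
  | w :: ws =>
    let n_pieces := PySem.List.count w player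
    let n_zeros := PySem.List.count w 0
    (if n_pieces = 3 then some 3
     else if n_pieces = 2 ∧ n_zeros = 2 then some 2
     else none).orElse (fun _ => firstP ws player)

def firstO (windows : List (List Int)) (player : Int) : Option Int :=
  match windows with
  | [] => none
  | w :: ws =>
    let n_pieces := PySem.List.count w player
    let n_zeros := PySem.List.count w 0
    (if n_pieces = 0 ∧ n_zeros = 1 then some (-3)
     else if n_pieces = 0 ∧ n_zeros = 2 then some (-2)
     else none).orElse (fun _ => firstO ws player)

theorem loopPlayer_eq (windows : List (List Int)) (player : Int) (sc : List Int) :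
    loopPlayer windows player sc = sc ++ optList (firstP windows player) := by
  induction windows generalizing sc with
  | nil => simp [loopPlayer, firstP, optList]
  | cons w ws ih =>
    simp only [loopPlayer, firstP, evaluate_window_for_player]
    split_ifs with h1 h2 <;> simp_all [optList, Option.orElse, ih]

theorem loopOpponent_eq (windows : List (List Int)) (player : Int) (sc : List Int) :
    loopOpponent windows player sc = sc ++ optList (firstO windows player) := by
  induction windows generalizing sc with
  | nil => simp [loopOpponent, firstO, optList]
  | cons w ws ih =>
    simp only [loopOpponent, firstO, evaluate_window_for_opponent]
    split_ifs with h1 h2 <;> simp_all [optList, Option.orElse, ih]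

theorem loopB_eq (windows : List (List Int)) (player : Int) (p o : Option Int) :
    loopB windows player p o =
      optList (p.orElse (fun _ => firstP windows player)) ++
      optList (o.orElse (fun _ => firstO windows player)) := by
  induction windows generalizing p o with
  | nil => cases p <;> cases o <;> simp [loopB, firstP, firstO, Option.orElse]
  | cons w ws ih =>
    simp only [loopB, firstP, firstO]
    cases p <;> cases o <;>
      split_ifs <;>
      simp_all [ih, Option.orElse, Option.isSome]

-- ===== VERDICT (by name: the statement is the Claim_ definition above) =====
theorem evaluate_one_direction_spec : Claim_equal_evaluate_one_direction := by
  intro windows player _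
  unfold Spec_evaluate_one_direction evaluate_one_direction evaluate_one_direction_alt
  rw [loopPlayer_eq, loopOpponent_eq, loopB_eq]
  simp [Option.orElse]
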